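-- pv_equiv track=rewrite | github.com/Mingyu-Kim-001/LeetCode | Arrays/medium/1686. Stone Game VI.py | stoneGameVI
-- ===== SOURCE A (Python) =====
-- from typing import List
--
-- def stoneGameVI(aliceValues: List[int], bobValues: List[int]) -> int:
--     hap = [(i,j,i+j ) for i,j in zip(aliceValues,bobValues)]
--     hap = sorted(hap,reverse=True,key=lambda x:x[2])
--     aliceSums = sum([i[0] for i in hap[::2]])
--     bobSums = sum([i[1] for i in hap[1::2]])
--     if aliceSums>bobSums: return 1
--     elif aliceSums<bobSums: return -1
--     return 0
-- ===== SOURCE B (Python) =====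
-- from typing import List
--
-- def stoneGameVI(aliceValues: List[int], bobValues: List[int]) -> int:
--     # Bucket stones by combined value; within a bucket the score gap is a closed
--     # form (sumA - bobCount*s), so only the distinct combined values are sorted.
--     groups = {}
--     for a, b in zip(aliceValues, bobValues):
--         s = a + b
--         c, sa = groups.get(s, (0, 0))
--         groups[s] = (c + 1, sa + a)
--     diff = 0
--     pos = 0
--     for s in sorted(groups, reverse=True):
--         c, sa = groups[s]
--         bob = (c + pos % 2) // 2
--         diff += sa - bob * s
--         pos += c
--     return (diff > 0) - (diff < 0)
-- ===== Notes on version B (the rewrite author's own statement) =====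
-- stated objective: alternative
-- what changed: B replaces A's sort-all-triples-then-sum-alternating-slices with a bucketing algorithm: a dict aggregates, per distinct combined value, the stone count and Alice-value sum, only the distinct combined values are sorted, and each bucket's score contribution is computed in closed form from its count and the running position parity (correct because within a bucket of equal combined value s the gap contribution sumA - bobCount*s does not depend on which stones each player takes).
import Mathlib
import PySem

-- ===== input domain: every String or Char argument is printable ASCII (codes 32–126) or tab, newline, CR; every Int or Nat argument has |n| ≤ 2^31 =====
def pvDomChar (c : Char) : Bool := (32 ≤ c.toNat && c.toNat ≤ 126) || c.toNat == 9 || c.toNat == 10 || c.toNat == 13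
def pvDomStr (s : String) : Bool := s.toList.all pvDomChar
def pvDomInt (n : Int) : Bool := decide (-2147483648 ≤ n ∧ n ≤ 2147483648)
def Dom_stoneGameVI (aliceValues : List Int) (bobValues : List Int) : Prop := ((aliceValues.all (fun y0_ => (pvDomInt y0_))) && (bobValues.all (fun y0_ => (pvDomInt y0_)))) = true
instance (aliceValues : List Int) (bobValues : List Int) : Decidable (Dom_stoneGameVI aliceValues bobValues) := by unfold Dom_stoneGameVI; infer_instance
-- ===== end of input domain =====

-- B buckets the stones by combined value in a dict and sorts only the distinct
-- combined values, computing each bucket's score contribution in closed form;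
-- same winner, different algorithm (alternative, not claimed faster).

-- ===== PORT A =====
def stoneGameVI (aliceValues : List Int) (bobValues : List Int) : Int :=
  let hap := (aliceValues.zip bobValues).map (fun p => (p.1, p.2, p.1 + p.2))
  let hap2 := PySem.List.sorted hap (fun x => x.2.2) true
  -- hap[::2] / hap[1::2]: step-2 slices never fail in Python, so getD [] is exact
  let aliceSums := (((PySem.List.slice? hap2 none none 2).getD []).map (fun t => t.1)).sum
  let bobSums := (((PySem.List.slice? hap2 (some 1) none 2).getD []).map (fun t => t.2.1)).sum
  if aliceSums > bobSums then 1 else if aliceSums < bobSums then -1 else 0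

-- ===== PORT B =====
def stoneGameVI_alt (aliceValues : List Int) (bobValues : List Int) : Int :=
  let groups := (aliceValues.zip bobValues).foldl
    (fun (d : PySem.Dict Int (Int × Int)) p =>
      let cs := d.getD (p.1 + p.2) (0, 0)
      d.insert (p.1 + p.2) (cs.1 + 1, cs.2 + p.1)) PySem.Dict.empty
  -- sorted(groups, reverse=True) iterates the dict's keys
  let st := (PySem.List.sorted groups.keys (fun x => x) true).foldl
    (fun (st : Int × Int) s =>
      let cs := groups.getD s (0, 0)
      let bob := PySem.Int.floordiv (cs.1 + PySem.Int.mod st.2 2) 2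
      (st.1 + cs.2 - bob * s, st.2 + cs.1)) (0, 0)
  (if st.1 > 0 then (1 : Int) else 0) - (if st.1 < 0 then (1 : Int) else 0)

-- ===== PRECONDITION & SPEC =====
def Spec_stoneGameVI (aliceValues : List Int) (bobValues : List Int) (out : Int) : Prop := out = stoneGameVI_alt aliceValues bobValues
instance (aliceValues : List Int) (bobValues : List Int) (out : Int) : Decidable (Spec_stoneGameVI aliceValues bobValues out) := by unfold Spec_stoneGameVI; infer_instance

-- ===== CLAIM (what is proved, stated in full; the proofs are below) =====
def Claim_equal_stoneGameVI : Prop := ∀ (aliceValues : List Int) (bobValues : List Int), Dom_stoneGameVI aliceValues bobValues → Spec_stoneGameVI aliceValues bobValues (stoneGameVI aliceValues bobValues)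

-- ===== LEMMAS AND PROOFS =====

/-- Elements at even indices (Python's xs[::2]). -/
def pvEvens {α : Type} : List α → List α
  | [] => []
  | [x] => [x]
  | x :: _ :: r => x :: pvEvens r

/-- Elements at odd indices (Python's xs[1::2]). -/
def pvOdds {α : Type} : List α → List α
  | [] => []
  | _ :: r => pvEvens r

theorem pvOdds_cons {α : Type} (x : α) (xs : List α) : pvOdds (x :: xs) = pvEvens xs := rfl

theorem pvEvens_cons {α : Type} (x : α) (xs : List α) : pvEvens (x :: xs) = x :: pvOdds xs := by
  cases xs <;> rfl

theorem pvFilterMap_two {α : Type} (xs : List α) (c : Nat) (hc : c = (xs.length + 1) / 2) :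
    List.filterMap (fun k => xs[2 * k]?) (List.range c) = pvEvens xs := by
  induction xs using pvEvens.induct generalizing c with
  | case1 => subst hc; simp [pvEvens]
  | case2 x => subst hc; simp [pvEvens]
  | case3 x y r ih =>
    have hc' : c = (r.length + 1) / 2 + 1 := by subst hc; simp; omega
    subst hc'
    rw [List.range_succ_eq_map]
    simp only [List.filterMap_cons, List.filterMap_map, Function.comp_def]
    rw [show (fun k => (x :: y :: r)[2 * (k + 1)]?) = (fun k => r[2 * k]?) by
      funext k; have h2 : 2 * (k + 1) = (2 * k) + 1 + 1 := by omega
      rw [h2]; simp]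
    simp [pvEvens, ih _ rfl]

theorem pvFilterMap_two_odd {α : Type} (xs : List α) :
    List.filterMap (fun k => xs[2 * k + 1]?) (List.range (xs.length / 2)) = pvOdds xs := by
  cases xs with
  | nil => simp [pvOdds]
  | cons x t =>
    have : (fun k => (x :: t)[2 * k + 1]?) = (fun k => t[2 * k]?) := by
      funext k; simp
    rw [this, show (x :: t).length / 2 = (t.length + 1) / 2 by simp]
    exact pvFilterMap_two t _ rfl

theorem pvSlice?_two {α : Type} (xs : List α) :
    PySem.List.slice? xs none none 2 = some (pvEvens xs) := by
  simp only [PySem.List.slice?, PySem.List.sliceIndices]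
  norm_num
  have h1 : (if 0 < xs.length then (((xs.length : Int) + 2 - 1) / 2).toNat else 0) = (xs.length + 1) / 2 := by
    split <;> omega
  rw [h1, ← pvFilterMap_two xs _ rfl]
  apply List.filterMap_congr
  intro k _
  congr 1

theorem pvSlice?_one_two {α : Type} (xs : List α) :
    PySem.List.slice? xs (some 1) none 2 = some (pvOdds xs) := by
  simp only [PySem.List.slice?, PySem.List.sliceIndices]
  norm_num
  have h1 : (if 1 < xs.length then (((xs.length : Int) - min 1 (xs.length : Int) + 2 - 1) / 2).toNat else 0) = xs.length / 2 := by
    split <;> omega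
  rw [h1, ← pvFilterMap_two_odd xs]
  apply List.filterMap_congr
  intro k hk
  rw [List.mem_range] at hk
  congr 1
  omega

-- Alice's lead over Bob, rewritten through the combined values:
-- sum_even(.1) - sum_odd(.2.1) = sum_even(.2.2) - sum_all(.2.1) whenever .2.2 = .1 + .2.1 holds pointwise.
theorem pvKeySum (L : List (Int × Int × Int)) (h : ∀ x ∈ L, x.2.2 = x.1 + x.2.1) :
    ((pvEvens L).map (fun t => t.1)).sum - ((pvOdds L).map (fun t => t.2.1)).sum
      = (pvEvens (L.map (fun t => t.2.2))).sum - (L.map (fun t => t.2.1)).sum := by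
  induction L using pvEvens.induct with
  | case1 => simp [pvEvens, pvOdds]
  | case2 x =>
    have hx := h x (by simp)
    simp [pvEvens, pvOdds]
    omega
  | case3 x y r ih =>
    have hx := h x (by simp)
    have hy := h y (by simp)
    have ihr := ih (fun z hz => h z (by simp [hz]))
    simp only [List.map_cons, pvEvens, pvOdds_cons, List.sum_cons] at *
    rw [pvEvens_cons y r, List.map_cons, List.sum_cons]
    omega

-- mapping the sort key over a reverse-sorted list = reverse-sorting the mapped keys
theorem pvMapKeySorted {α : Type} (xs : List α) (key : α → Int) :
    (PySem.List.sorted xs key true).map key = PySem.List.sorted (xs.map key) (fun x => x) true := by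
  apply PySem.List.eq_of_perm_of_pairwise_le_of_injective (fun x : Int => -x) neg_injective
  · exact ((PySem.List.sorted_perm xs key true).map key).trans
      (PySem.List.sorted_perm (xs.map key) (fun x => x) true).symm
  · have := PySem.List.sorted_pairwise_rev xs key
    rw [List.pairwise_map]
    exact this.imp (fun h => by simpa using h)
  · have := PySem.List.sorted_pairwise_rev (xs.map key) (fun x => x)
    exact this.imp (fun h => by simpa using h)

theorem pvEvens_add_pvOdds_sum (xs : List Int) : (pvEvens xs).sum + (pvOdds xs).sum = xs.sum := by
  induction xs using pvEvens.induct with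
  | case1 => simp [pvEvens, pvOdds]
  | case2 x => simp [pvEvens, pvOdds]
  | case3 x y r ih =>
    simp only [pvEvens, pvOdds_cons, List.sum_cons] at *
    rw [pvEvens_cons y r, List.sum_cons]
    omega

theorem pvEvens_append {α : Type} (xs ys : List α) :
    pvEvens (xs ++ ys) = pvEvens xs ++ (if xs.length % 2 = 0 then pvEvens ys else pvOdds ys) := by
  induction xs using pvEvens.induct with
  | case1 => simp [pvEvens]
  | case2 x => cases ys <;> simp [pvEvens, pvOdds]
  | case3 x y r ih =>
    simp only [List.cons_append, pvEvens, ih, List.length_cons, List.cons_append]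
    have h2 : (r.length + 1 + 1) % 2 = r.length % 2 := by omega
    simp only [h2]

theorem pvOdds_append {α : Type} (xs ys : List α) :
    pvOdds (xs ++ ys) = pvOdds xs ++ (if xs.length % 2 = 0 then pvOdds ys else pvEvens ys) := by
  cases xs with
  | nil => simp [pvOdds]
  | cons x t =>
    simp only [List.cons_append, pvOdds, pvEvens_append, List.length_cons]
    congr 1
    by_cases h : t.length % 2 = 0
    · rw [if_pos h, if_neg (by omega)]
    · rw [if_neg h, if_pos (by omega)]

theorem pvEvens_replicate {α : Type} (n : Nat) (s : α) :
    pvEvens (List.replicate n s) = List.replicate ((n + 1) / 2) s := by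
  induction n using Nat.twoStepInduction with
  | zero => rfl
  | one => rfl
  | more n ih _ =>
    rw [show n + 2 = n + 1 + 1 from rfl, List.replicate_succ, List.replicate_succ]
    simp only [pvEvens, ih]
    rw [show (n + 2 + 1) / 2 = (n + 1) / 2 + 1 by omega, List.replicate_succ]

theorem pvOdds_replicate {α : Type} (n : Nat) (s : α) :
    pvOdds (List.replicate n s) = List.replicate (n / 2) s := by
  cases n with
  | zero => rfl
  | succ m => rw [List.replicate_succ]; simp only [pvOdds, pvEvens_replicate]

-- the grouping dict holds, per combined value s, (multiplicity of s, sum of Alice's values there)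
theorem pvDict_getD (z : List (Int × Int)) (d : PySem.Dict Int (Int × Int)) (s : Int) :
    (z.foldl (fun (d : PySem.Dict Int (Int × Int)) p =>
        d.insert (p.1 + p.2) ((d.getD (p.1 + p.2) (0, 0)).1 + 1, (d.getD (p.1 + p.2) (0, 0)).2 + p.1)) d).getD s (0, 0)
      = ((d.getD s (0, 0)).1 + ((z.map (fun p => p.1 + p.2)).count s : Int),
         (d.getD s (0, 0)).2 + ((z.filter (fun p => p.1 + p.2 == s)).map (fun p => p.1)).sum) := by
  induction z generalizing d with
  | nil => simp
  | cons q z ih =>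
    simp only [List.foldl_cons, List.map_cons, List.filter_cons, List.count_cons]
    rw [ih]
    rw [PySem.Dict.getD_insert]
    by_cases h : q.1 + q.2 = s
    · simp [h]
      constructor
      · omega
      · omega
    · simp [h, beq_iff_eq, Ne.symm h]

theorem pvSumZero (ks : List Int) (a : Int) (v : Int) (ha : a ∉ ks) :
    (ks.map (fun s => if a = s then v else 0)).sum = 0 := by
  induction ks with
  | nil => simp
  | cons s ks ih =>
    simp only [List.mem_cons, not_or] at ha
    simp [ha.1, ih ha.2]

theorem pvSumIte (ks : List Int) (a : Int) (v : Int) (hnd : ks.Nodup) (ha : a ∈ ks) :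
    (ks.map (fun s => if a = s then v else 0)).sum = v := by
  induction ks with
  | nil => simp at ha
  | cons s ks ih =>
    rcases List.mem_cons.mp ha with h | h
    · subst h
      simp [pvSumZero ks a v (List.nodup_cons.mp hnd).1]
    · have hne : a ≠ s := by
        rintro rfl; exact (List.nodup_cons.mp hnd).1 h
      simp [hne, ih (List.nodup_cons.mp hnd).2 h]

-- summing each bucket's Alice-sum over all distinct keys gives the total Alice-sum
theorem pvSaSum (z : List (Int × Int)) (ks : List Int) (hnd : ks.Nodup)
    (hcov : ∀ p ∈ z, p.1 + p.2 ∈ ks) :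
    (ks.map (fun s => ((z.filter (fun p => p.1 + p.2 == s)).map (fun p => p.1)).sum)).sum
      = (z.map (fun p => p.1)).sum := by
  induction z with
  | nil => simp
  | cons q z ih =>
    have hsplit : (fun s => (((q :: z).filter (fun p => p.1 + p.2 == s)).map (fun p => p.1)).sum)
        = (fun s => (if q.1 + q.2 = s then q.1 else 0)
            + ((z.filter (fun p => p.1 + p.2 == s)).map (fun p => p.1)).sum) := by
      funext s
      by_cases h : q.1 + q.2 = s <;> simp [h]
    rw [hsplit, PySem.List.sum_map_add_int, pvSumIte ks _ _ hnd (hcov q (by simp)),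
        ih (fun p hp => hcov p (by simp [hp]))]
    simp

theorem pvCountFlat (ks : List Int) (cnt : Int → Nat) (x : Int) (hnd : ks.Nodup) :
    (ks.flatMap (fun s => List.replicate (cnt s) s)).count x = if x ∈ ks then cnt x else 0 := by
  induction ks with
  | nil => simp
  | cons s ks ih =>
    simp only [List.flatMap_cons, List.count_append, List.count_replicate,
      ih (List.nodup_cons.mp hnd).2]
    by_cases h : x = s
    · subst h
      simp [(List.nodup_cons.mp hnd).1]
    · simp [h, Ne.symm h]

theorem pvFlatPairwise (ks : List Int) (cnt : Int → Nat) (h : ks.Pairwise (fun a b => b < a)) :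
    (ks.flatMap (fun s => List.replicate (cnt s) s)).Pairwise (fun a b : Int => b ≤ a) := by
  induction ks with
  | nil => simp
  | cons s ks ih =>
    simp only [List.flatMap_cons]
    rw [List.pairwise_append]
    refine ⟨?_, ih (List.pairwise_cons.mp h).2, ?_⟩
    · apply List.pairwise_replicate.mpr
      simp
    · intro x hx y hy
      rcases List.eq_of_mem_replicate hx with rfl
      rcases List.mem_flatMap.mp hy with ⟨t, ht, hyt⟩
      rcases List.eq_of_mem_replicate hyt with rfl
      exact le_of_lt ((List.pairwise_cons.mp h).1 _ ht)

-- the fully sorted totals list is the concatenation of constant blocks over the sorted distinct keys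
theorem pvFlatEq (totals : List Int) :
    PySem.List.sorted totals (fun x => x) true
      = (PySem.List.sorted (PySem.Set.ofList totals) (fun x => x) true).flatMap
          (fun s => List.replicate (totals.count s) s) := by
  have hpermk : (PySem.List.sorted (PySem.Set.ofList totals) (fun x => x) true).Perm (PySem.Set.ofList totals) :=
    PySem.List.sorted_perm _ _ _
  have hnd : (PySem.List.sorted (PySem.Set.ofList totals) (fun x => x) true).Nodup :=
    hpermk.symm.nodup (PySem.Set.nodup_ofList totals)
  have hmemk : ∀ x, x ∈ PySem.List.sorted (PySem.Set.ofList totals) (fun x => x) true ↔ x ∈ totals := by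
    intro x
    rw [PySem.List.mem_sorted, PySem.Set.mem_ofList]
  apply PySem.List.eq_of_perm_of_pairwise_le_of_injective (fun x : Int => -x) neg_injective
  · refine (PySem.List.sorted_perm _ _ _).trans (List.perm_iff_count.mpr (fun x => ?_)).symm
    rw [pvCountFlat _ _ _ hnd]
    by_cases h : x ∈ totals
    · simp [(hmemk x).mpr h]
    · rw [if_neg (fun hx => h ((hmemk x).mp hx)), List.count_eq_zero_of_not_mem h]
  · have := PySem.List.sorted_pairwise_rev totals (fun x => x)
    exact this.imp (fun h => by simpa using h)
  · have hstrict : (PySem.List.sorted (PySem.Set.ofList totals) (fun x => x) true).Pairwise (fun a b => b < a) := by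
      have h1 := PySem.List.sorted_pairwise_rev (PySem.Set.ofList totals) (fun x => x)
      have := h1.and hnd
      exact this.imp (fun ⟨hle, hne⟩ => lt_of_le_of_ne hle (Ne.symm hne))
    have := pvFlatPairwise _ (fun s => totals.count s) hstrict
    exact this.imp (fun h => by simpa using h)

-- B's alternating bucket loop, characterised against the flattened sorted list
theorem pvFold (cnt : Int → Nat) (sa : Int → Int) (ks : List Int) :
    ∀ (dAcc : Int) (p : Nat),
    (ks.foldl (fun (st : Int × Int) s =>
        (st.1 + sa s - PySem.Int.floordiv ((cnt s : Int) + PySem.Int.mod st.2 2) 2 * s,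
         st.2 + (cnt s : Int))) (dAcc, (p : Int))).1
      = dAcc + (ks.map sa).sum
        - (if p % 2 = 0 then (pvOdds (ks.flatMap (fun s => List.replicate (cnt s) s))).sum
           else (pvEvens (ks.flatMap (fun s => List.replicate (cnt s) s))).sum) := by
  induction ks with
  | nil => intro dAcc p; simp [pvOdds, pvEvens]
  | cons s ks ih =>
    intro dAcc p
    simp only [List.foldl_cons, List.map_cons, List.sum_cons, List.flatMap_cons]
    have hmod : PySem.Int.mod ((p : Nat) : Int) 2 = (((p % 2 : Nat)) : Int) := by
      rw [PySem.Int.mod_eq_emod_of_pos (by omega)]; omega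
    have hfd : PySem.Int.floordiv ((cnt s : Int) + (((p % 2 : Nat)) : Int)) 2
        = ((((cnt s + p % 2) / 2 : Nat)) : Int) := by
      rw [PySem.Int.floordiv_eq_ediv_of_pos (by omega)]; omega
    have hcast : ((p : Nat) : Int) + (cnt s : Int) = (((p + cnt s : Nat)) : Int) := by push_cast; ring
    rw [hmod, hfd, hcast, ih]
    rw [pvOdds_append, pvEvens_append, pvOdds_replicate, pvEvens_replicate]
    simp only [List.sum_append, List.sum_replicate, nsmul_eq_mul, List.length_replicate]
    by_cases hp : p % 2 = 0 <;> by_cases hc : cnt s % 2 = 0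
    · rw [if_pos hp, if_pos hc, if_pos (by omega : (p + cnt s) % 2 = 0), hp]
      push_cast
      ring_nf
    · rw [if_pos hp, if_neg hc, if_neg (by omega : ¬ (p + cnt s) % 2 = 0), hp]
      push_cast
      ring_nf
    · rw [if_neg hp, if_pos hc, if_neg (by omega : ¬ (p + cnt s) % 2 = 0),
        (by omega : p % 2 = 1)]
      have : (cnt s + 1) / 2 = cnt s / 2 := by omega
      rw [this]
      push_cast
      ring
    · rw [if_neg hp, if_neg hc, if_pos (by omega : (p + cnt s) % 2 = 0),
        (by omega : p % 2 = 1)]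
      have : cnt s / 2 + 1 = (cnt s + 1) / 2 := by omega
      rw [← this]
      push_cast
      ring

-- ===== VERDICT (by name: the statement is the Claim_ definition above) =====
theorem stoneGameVI_spec : Claim_equal_stoneGameVI := by
  intro a b _
  unfold Spec_stoneGameVI stoneGameVI stoneGameVI_alt
  simp only [pvSlice?_two, pvSlice?_one_two, Option.getD_some]
  set z := a.zip b with hz
  set hap := z.map (fun p => (p.1, p.2, p.1 + p.2)) with hhap
  set L := PySem.List.sorted hap (fun x => x.2.2) true with hL
  set totals := z.map (fun p => p.1 + p.2) with htot
  set T := PySem.List.sorted totals (fun x => x) true with hT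
  -- A's decision value
  have hinv : ∀ x ∈ L, x.2.2 = x.1 + x.2.1 := by
    intro x hx
    rw [hL, PySem.List.mem_sorted, hhap] at hx
    obtain ⟨p, _, rfl⟩ := List.mem_map.mp hx
    rfl
  have key := pvKeySum L hinv
  have hthird : L.map (fun t => t.2.2) = T := by
    rw [hL, pvMapKeySorted hap (fun x => x.2.2), hhap, hT, htot, List.map_map]
    rfl
  have hb : (L.map (fun t => t.2.1)).sum = (z.map (fun p => p.2)).sum := by
    have hperm : L.Perm hap := PySem.List.sorted_perm _ _ _
    rw [(hperm.map (fun t => t.2.1)).sum_eq, hhap, List.map_map]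
    rfl
  rw [hthird, hb] at key
  -- B's grouping dict
  set groups := z.foldl (fun (d : PySem.Dict Int (Int × Int)) p =>
      d.insert (p.1 + p.2) ((d.getD (p.1 + p.2) (0, 0)).1 + 1, (d.getD (p.1 + p.2) (0, 0)).2 + p.1)) PySem.Dict.empty with hg
  have hgetD : ∀ s, groups.getD s (0, 0)
      = ((totals.count s : Int), ((z.filter (fun p => p.1 + p.2 == s)).map (fun p => p.1)).sum) := by
    intro s
    rw [hg, pvDict_getD]
    simp [htot]
  have hkeys : groups.keys = PySem.Set.ofList totals := by
    rw [hg, PySem.Dict.keys_foldl_insert_key z (fun p : Int × Int => p.1 + p.2)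
      (fun d p => ((d.getD (p.1 + p.2) (0, 0)).1 + 1, (d.getD (p.1 + p.2) (0, 0)).2 + p.1))
      PySem.Dict.empty]
    rw [PySem.Dict.keys_empty, PySem.Set.update_nil_left, htot]
  rw [hkeys]
  set ks := PySem.List.sorted (PySem.Set.ofList totals) (fun x => x) true with hksdef
  have hpermk : ks.Perm (PySem.Set.ofList totals) := PySem.List.sorted_perm _ _ _
  have hnd : ks.Nodup := hpermk.symm.nodup (PySem.Set.nodup_ofList totals)
  -- B's loop function, rewritten through the dict characterisation
  have hfun : (fun (st : Int × Int) s =>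
        (st.1 + (groups.getD s (0, 0)).2
           - PySem.Int.floordiv ((groups.getD s (0, 0)).1 + PySem.Int.mod st.2 2) 2 * s,
         st.2 + (groups.getD s (0, 0)).1))
      = (fun (st : Int × Int) s =>
        (st.1 + ((z.filter (fun p => p.1 + p.2 == s)).map (fun p => p.1)).sum
           - PySem.Int.floordiv ((totals.count s : Int) + PySem.Int.mod st.2 2) 2 * s,
         st.2 + (totals.count s : Int))) := by
    funext st s
    rw [hgetD]
  rw [hfun]
  have hfold := pvFold (fun s => totals.count s)
    (fun s => ((z.filter (fun p => p.1 + p.2 == s)).map (fun p => p.1)).sum) ks 0 0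
  simp only [Nat.cast_zero, Nat.zero_mod, reduceIte, zero_add] at hfold
  rw [hfold]
  -- identify the flattened block list with T and the bucket sums with Alice's total
  rw [show ks.flatMap (fun s => List.replicate (totals.count s) s) = T from (pvFlatEq totals).symm]
  rw [pvSaSum z ks hnd (fun p hp => by
    rw [hksdef, PySem.List.mem_sorted, PySem.Set.mem_ofList, htot]
    exact List.mem_map.mpr ⟨p, hp, rfl⟩)]
  -- final arithmetic: both sides are the sign of the same integer
  have hEO := pvEvens_add_pvOdds_sum T
  have hTsum : T.sum = totals.sum := (PySem.List.sorted_perm _ _ _).sum_eq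
  have hsplitsum : totals.sum = (z.map (fun p => p.1)).sum + (z.map (fun p => p.2)).sum := by
    rw [htot, ← PySem.List.sum_map_add_int]
  split_ifs <;> omega
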